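-- pv_equiv track=rewrite | github.com/liujiyaoFDU/MedQ-Uni | inference_pipeline/parse_statistics_to_csv.py | generate_column_names
-- ===== SOURCE A (Python) =====
-- from typing import List, Dict, Tuple, Optional
--
-- JSON_FIELD_TIMESTAMP = 'timestamp'
--
-- DEFAULT_BASE_COLUMNS = [
--     'model_id',
--     'split',
--     'total_samples',
--     'psnr_mean',
--     'psnr_std',
--     'ssim_mean',
--     'ssim_std',
--     'avg_inference_time'
-- ]
--
-- DEFAULT_TASK_COLUMN_SUFFIXES = [
--     'type',
--     'count',
--     'psnr_mean',
--     'psnr_std',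
--     'ssim_mean',
--     'ssim_std'
-- ]
--
-- def generate_column_names(max_tasks: int) -> List[str]:
--     """
--     Generate column names for the CSV based on the maximum number of task types.
--
--     Args:
--         max_tasks: Maximum number of task types
--
--     Returns:
--         List of column names
--     """
--     # Start with base columns
--     columns = list(DEFAULT_BASE_COLUMNS)
--
--     # Add task1 columns first (if max_tasks >= 1)
--     if max_tasks >= 1:
--         for suffix in DEFAULT_TASK_COLUMN_SUFFIXES:
--             columns.append(f'task1_{suffix}')
--
--         # Add timestamp immediately after task1
--         columns.append(JSON_FIELD_TIMESTAMP)
--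
--     # Add remaining task columns (task2 onwards)
--     for i in range(2, max_tasks + 1):
--         for suffix in DEFAULT_TASK_COLUMN_SUFFIXES:
--             columns.append(f'task{i}_{suffix}')
--
--     return columns
-- ===== SOURCE B (Python) =====
-- from typing import List
--
-- JSON_FIELD_TIMESTAMP = 'timestamp'
--
-- DEFAULT_BASE_COLUMNS = [
--     'model_id',
--     'split',
--     'total_samples',
--     'psnr_mean',
--     'psnr_std',
--     'ssim_mean',
--     'ssim_std',
--     'avg_inference_time'
-- ]
--
-- DEFAULT_TASK_COLUMN_SUFFIXES = [
--     'type',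
--     'count',
--     'psnr_mean',
--     'psnr_std',
--     'ssim_mean',
--     'ssim_std'
-- ]
--
-- def generate_column_names(max_tasks: int) -> List[str]:
--     """One uniform pass over all tasks, then a single positional insert of 'timestamp'."""
--     columns = list(DEFAULT_BASE_COLUMNS)
--     columns += [f'task{i}_{suffix}'
--                 for i in range(1, max_tasks + 1)
--                 for suffix in DEFAULT_TASK_COLUMN_SUFFIXES]
--     if max_tasks >= 1:
--         columns.insert(len(DEFAULT_BASE_COLUMNS) + len(DEFAULT_TASK_COLUMN_SUFFIXES),
--                        JSON_FIELD_TIMESTAMP)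
--     return columns
-- ===== Notes on version B (the rewrite author's own statement) =====
-- stated objective: simpler
-- what changed: Replaced A's special-cased task1 loop plus a second range(2, max_tasks+1) loop with one uniform comprehension over range(1, max_tasks+1), followed by a single positional insert of 'timestamp' at the fixed index len(base)+len(suffixes).
import Mathlib
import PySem

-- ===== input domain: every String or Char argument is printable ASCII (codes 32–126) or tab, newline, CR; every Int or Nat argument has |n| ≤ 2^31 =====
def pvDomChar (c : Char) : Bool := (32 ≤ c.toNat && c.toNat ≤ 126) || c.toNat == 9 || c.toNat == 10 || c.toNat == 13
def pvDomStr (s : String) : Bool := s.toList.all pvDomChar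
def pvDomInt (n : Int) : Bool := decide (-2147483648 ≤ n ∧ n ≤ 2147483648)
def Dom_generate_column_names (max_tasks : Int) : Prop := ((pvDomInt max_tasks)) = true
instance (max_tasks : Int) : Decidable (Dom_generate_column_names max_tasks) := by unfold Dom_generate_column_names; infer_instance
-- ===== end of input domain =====

-- B builds all task columns in one uniform pass and inserts 'timestamp' at a fixed index (simpler decomposition).

-- module constants shared by both ports
def DEFAULT_BASE_COLUMNS : List String :=
  ["model_id", "split", "total_samples", "psnr_mean", "psnr_std", "ssim_mean", "ssim_std", "avg_inference_time"]

def DEFAULT_TASK_COLUMN_SUFFIXES : List String :=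
  ["type", "count", "psnr_mean", "psnr_std", "ssim_mean", "ssim_std"]

-- ===== PORT A =====
def generate_column_names (max_tasks : Int) : List String :=
  let columns := DEFAULT_BASE_COLUMNS
  let columns :=
    if max_tasks ≥ 1 then
      (DEFAULT_TASK_COLUMN_SUFFIXES.foldl (fun acc s => acc ++ ["task1_" ++ s]) columns) ++ ["timestamp"]
    else columns
  (PySem.List.pyRange 2 (max_tasks + 1) 1).foldl
    (fun acc i =>
      DEFAULT_TASK_COLUMN_SUFFIXES.foldl (fun acc s => acc ++ ["task" ++ PySem.Int.toStr i ++ "_" ++ s]) acc)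
    columns

-- ===== PORT B =====
def generate_column_names_alt (max_tasks : Int) : List String :=
  let columns := DEFAULT_BASE_COLUMNS ++
    (PySem.List.pyRange 1 (max_tasks + 1) 1).flatMap
      (fun i => DEFAULT_TASK_COLUMN_SUFFIXES.map (fun s => "task" ++ PySem.Int.toStr i ++ "_" ++ s))
  if max_tasks ≥ 1 then PySem.List.insert columns 14 "timestamp" else columns

-- ===== PRECONDITION & SPEC =====
def Spec_generate_column_names (max_tasks : Int) (out : List String) : Prop := out = generate_column_names_alt max_tasks
instance (max_tasks : Int) (out : List String) : Decidable (Spec_generate_column_names max_tasks out) := by unfold Spec_generate_column_names; infer_instance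

-- ===== CLAIM (what is proved, stated in full; the proofs are below) =====
def Claim_equal_generate_column_names : Prop := ∀ (max_tasks : Int), Dom_generate_column_names max_tasks → Spec_generate_column_names max_tasks (generate_column_names max_tasks)

-- ===== LEMMAS AND PROOFS =====

theorem gcn_eq (max_tasks : Int) :
    generate_column_names max_tasks = generate_column_names_alt max_tasks := by
  unfold generate_column_names generate_column_names_alt
  by_cases h : max_tasks ≥ 1
  · simp only [h, if_pos]
    rw [PySem.List.pyRange_one_cons (by omega : (1:Int) < max_tasks + 1)]
    simp only [List.flatMap_cons]
    rw [PySem.List.insert_ofNat _ 14 _ (by simp [DEFAULT_BASE_COLUMNS, DEFAULT_TASK_COLUMN_SUFFIXES])]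
    simp only [PySem.List.foldl_append_singleton_eq_map, PySem.List.foldl_append_eq_flatMap]
    have hmap : List.map (fun s => "task" ++ PySem.Int.toStr 1 ++ "_" ++ s) DEFAULT_TASK_COLUMN_SUFFIXES
        = List.map (HAppend.hAppend "task1_") DEFAULT_TASK_COLUMN_SUFFIXES := by decide
    have h2 : (1 : Int) + 1 = 2 := by norm_num
    rw [hmap, h2, ← List.append_assoc DEFAULT_BASE_COLUMNS]
    have hlen : (DEFAULT_BASE_COLUMNS ++ List.map (HAppend.hAppend "task1_") DEFAULT_TASK_COLUMN_SUFFIXES).length = 14 := by decide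
    rw [List.take_left' hlen, List.drop_left' hlen]
    simp
  · simp only [h, if_neg, not_false_iff]
    rw [PySem.List.pyRange_one_eq_nil (by omega : max_tasks + 1 ≤ 2),
        PySem.List.pyRange_one_eq_nil (by omega : max_tasks + 1 ≤ 1)]
    simp

-- ===== VERDICT (by name: the statement is the Claim_ definition above) =====
theorem generate_column_names_spec : Claim_equal_generate_column_names := by
  intro n _; exact gcn_eq n
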